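-- pv_equiv track=rewrite | github.com/nomelancholy/problem_solving | 프로그래머스/lv1/42840. 모의고사/모의고사.py | solution
-- ===== SOURCE A (Python) =====
-- def solution(answers):
--
--     # 찍는 방식 정의
--     style = {1 : [1, 2, 3, 4, 5], 2 : [2, 1, 2, 3, 2, 4, 2, 5], 3 : [3, 3, 1, 1, 2, 2, 4, 4, 5, 5]}
--
--     scores = [0, 0, 0, 0]
--     # 채점
--     for idx, answer in enumerate(answers):
--         for i in range(1, 4):
--             if style[i][idx % len(style[i])] == answer:
--                 scores[i] += 1
--
--     # 최고점을 찾고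
--     best_count = max(scores)
--
--     # 그 점수를 획득한 학생을 배열에 추가
--     best_students = []
--
--     for i in range(1, len(scores)):
--         if best_count == scores[i]:
--             best_students.append(i)
--
--     return best_students
-- ===== SOURCE B (Python) =====
-- def solution(answers):
--     patterns = [[1, 2, 3, 4, 5],
--                 [2, 1, 2, 3, 2, 4, 2, 5],
--                 [3, 3, 1, 1, 2, 2, 4, 4, 5, 5]]
--     # One pass builds a frequency table keyed by (index mod 40, answer); 40 = lcm of the
--     # three pattern periods, so each pattern's score is a fixed 40-term sum of lookups.
--     freq = {}
--     for i, a in enumerate(answers):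
--         k = (i % 40, a)
--         freq[k] = freq.get(k, 0) + 1
--     scores = [sum(freq.get((r, pat[r % len(pat)]), 0) for r in range(40))
--               for pat in patterns]
--     best = max(scores)
--     return [s + 1 for s in range(3) if scores[s] == best]
-- ===== Notes on version B (the rewrite author's own statement) =====
-- stated objective: alternative
-- what changed: A compares every answer against the three cyclic patterns in one interleaved pass over a 4-slot scores array; B instead builds a frequency table keyed by (index mod 40, answer) in one pass (40 = lcm of the pattern periods) and obtains each pattern's score as a fixed 40-term sum of table lookups, then filters a 3-element scores list.
import Mathlib
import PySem

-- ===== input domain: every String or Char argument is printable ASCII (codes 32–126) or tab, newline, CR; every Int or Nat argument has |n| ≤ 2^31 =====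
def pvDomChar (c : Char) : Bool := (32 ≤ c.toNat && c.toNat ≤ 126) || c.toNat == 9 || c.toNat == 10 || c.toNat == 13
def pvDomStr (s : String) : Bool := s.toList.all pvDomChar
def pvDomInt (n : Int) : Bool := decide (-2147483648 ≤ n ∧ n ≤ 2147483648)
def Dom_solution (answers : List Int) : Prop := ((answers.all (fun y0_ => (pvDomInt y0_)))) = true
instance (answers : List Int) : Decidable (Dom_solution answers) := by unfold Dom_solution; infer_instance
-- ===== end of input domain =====

-- B replaces A's per-answer comparison against the three cyclic patterns by a one-pass
-- frequency table keyed by (index mod 40, answer) — 40 = lcm of the pattern periods — from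
-- which each score is a fixed 40-term sum of lookups (objective: alternative).

-- ===== PORT A =====
-- the dict 'style'; keys 1,2,3 are always present, so style[i] is ported as (get? i).getD []
def styleA : PySem.Dict Int (List Int) :=
  ((PySem.Dict.empty.insert 1 [1, 2, 3, 4, 5]).insert 2 [2, 1, 2, 3, 2, 4, 2, 5]).insert
    3 [3, 3, 1, 1, 2, 2, 4, 4, 5, 5]

-- the body of A's outer loop (the inner 'for i in range(1, 4)')
def stepA (scores : List Int) (p : Int × Int) : List Int :=
  (PySem.List.pyRange 1 4 1).foldl
    (fun sc i =>
      let pat := (styleA.get? i).getD []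
      if PySem.List.pyGetD pat (PySem.Int.mod p.1 (pat.length : Int)) 0 = p.2 then
        PySem.List.pySetD sc i (PySem.List.pyGetD sc i 0 + 1)
      else sc)
    scores

def solution (answers : List Int) : List Int :=
  let scores := (PySem.List.enumerate answers 0).foldl stepA [0, 0, 0, 0]
  -- max(scores); scores is the non-empty 4-slot list, so max never raises
  let best_count := (PySem.List.max? scores (fun y => y)).getD 0
  (PySem.List.pyRange 1 (scores.length : Int) 1).foldl
    (fun acc i => if best_count = PySem.List.pyGetD scores i 0 then acc ++ [i] else acc) []

-- ===== PORT B =====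
-- freq[k] = freq.get(k, 0) + 1 with k = (i % 40, a)
def freqStep (d : PySem.Dict (Int × Int) Int) (p : Int × Int) : PySem.Dict (Int × Int) Int :=
  d.insert (PySem.Int.mod p.1 40, p.2) (d.getD (PySem.Int.mod p.1 40, p.2) 0 + 1)

def freqB (answers : List Int) : PySem.Dict (Int × Int) Int :=
  (PySem.List.enumerate answers 0).foldl freqStep PySem.Dict.empty

-- sum(freq.get((r, pat[r % len(pat)]), 0) for r in range(40))
def scoreB (pat : List Int) (d : PySem.Dict (Int × Int) Int) : Int :=
  ((PySem.List.pyRange 0 40 1).map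
    (fun r => d.getD (r, PySem.List.pyGetD pat (PySem.Int.mod r (pat.length : Int)) 0) 0)).sum

def solution_alt (answers : List Int) : List Int :=
  let patterns : List (List Int) :=
    [[1, 2, 3, 4, 5], [2, 1, 2, 3, 2, 4, 2, 5], [3, 3, 1, 1, 2, 2, 4, 4, 5, 5]]
  let freq := freqB answers
  let scores := patterns.map (fun pat => scoreB pat freq)
  -- max(scores); scores has three elements, so max never raises
  let best := (PySem.List.max? scores (fun y => y)).getD 0
  ((PySem.List.pyRange 0 3 1).filter
      (fun s => PySem.List.pyGetD scores s 0 == best)).map (fun s => s + 1)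

-- ===== PRECONDITION & SPEC =====
def Spec_solution (answers : List Int) (out : List Int) : Prop := out = solution_alt answers
instance (answers : List Int) (out : List Int) : Decidable (Spec_solution answers out) := by unfold Spec_solution; infer_instance

-- ===== CLAIM (what is proved, stated in full; the proofs are below) =====
def Claim_equal_solution : Prop := ∀ (answers : List Int), Dom_solution answers → Spec_solution answers (solution answers)

-- ===== LEMMAS AND PROOFS =====

-- number of positions k (counted from offset s) where pattern pat matches the answer
def cnt (pat : List Int) (s : Nat) : List Int → Nat
  | [] => 0
  | a :: t => (if pat.getD (s % pat.length) 0 = a then 1 else 0) + cnt pat (s + 1) t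

theorem pyGetD_mod (pat : List Int) (s : Nat) :
    PySem.List.pyGetD pat (PySem.Int.mod (s : Int) (pat.length : Int)) 0 =
      pat.getD (s % pat.length) 0 := by
  rw [PySem.Int.mod_natCast, PySem.List.pyGetD_natCast]

theorem hget1 (x y z w : Int) : PySem.List.pyGetD [x, y, z, w] 1 0 = y := rfl
theorem hget2 (x y z w : Int) : PySem.List.pyGetD [x, y, z, w] 2 0 = z := rfl
theorem hget3 (x y z w : Int) : PySem.List.pyGetD [x, y, z, w] 3 0 = w := rfl
theorem hset1 (x y z w v : Int) : PySem.List.pySetD [x, y, z, w] 1 v = [x, v, z, w] := rfl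
theorem hset2 (x y z w v : Int) : PySem.List.pySetD [x, y, z, w] 2 v = [x, y, v, w] := rfl
theorem hset3 (x y z w v : Int) : PySem.List.pySetD [x, y, z, w] 3 v = [x, y, z, v] := rfl
theorem hget3a (x y z : Int) : PySem.List.pyGetD [x, y, z] 0 0 = x := rfl
theorem hget3b (x y z : Int) : PySem.List.pyGetD [x, y, z] 1 0 = y := rfl
theorem hget3c (x y z : Int) : PySem.List.pyGetD [x, y, z] 2 0 = z := rfl

theorem stepA_eval (s : Nat) (a b c d : Int) :
    stepA [0, b, c, d] ((s : Int), a) =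
      [0,
       b + (if ([1,2,3,4,5] : List Int).getD (s % ([1,2,3,4,5] : List Int).length) 0 = a then 1 else 0),
       c + (if ([2,1,2,3,2,4,2,5] : List Int).getD (s % ([2,1,2,3,2,4,2,5] : List Int).length) 0 = a then 1 else 0),
       d + (if ([3,3,1,1,2,2,4,4,5,5] : List Int).getD (s % ([3,3,1,1,2,2,4,4,5,5] : List Int).length) 0 = a then 1 else 0)] := by
  have hr : PySem.List.pyRange 1 4 1 = [1, 2, 3] := by decide
  have h1 : (styleA.get? 1).getD [] = ([1,2,3,4,5] : List Int) := by decide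
  have h2 : (styleA.get? 2).getD [] = ([2,1,2,3,2,4,2,5] : List Int) := by decide
  have h3 : (styleA.get? 3).getD [] = ([3,3,1,1,2,2,4,4,5,5] : List Int) := by decide
  simp only [stepA, hr, List.foldl_cons, List.foldl_nil, h1, h2, h3, pyGetD_mod]
  split_ifs <;> (try simp only [hget1, hget2, hget3, hset1, hset2, hset3]) <;> norm_num

set_option maxHeartbeats 1000000 in
theorem foldA_eval :
    ∀ (l : List Int) (s : Nat) (b c d : Int),
      (PySem.List.enumerate l (s : Int)).foldl stepA [0, b, c, d] =
        [0, b + (cnt [1,2,3,4,5] s l : Int), c + (cnt [2,1,2,3,2,4,2,5] s l : Int),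
         d + (cnt [3,3,1,1,2,2,4,4,5,5] s l : Int)] := by
  intro l
  induction l with
  | nil => intro s b c d; simp [cnt]
  | cons a t ih =>
    intro s b c d
    rw [PySem.List.enumerate_cons, List.foldl_cons, stepA_eval]
    have hs1 : (s : Int) + 1 = ((s + 1 : Nat) : Int) := by push_cast; ring
    rw [hs1, ih]
    simp only [cnt, List.cons.injEq, true_and, and_true]
    refine ⟨?_, ?_, ?_⟩ <;> (split_ifs <;> push_cast <;> ring)

-- the 40-term lookup sum after one histogram update: exactly the matched slot grows by 1
theorem sum_getD_insert (d : PySem.Dict (Int × Int) Int) (r0 a : Int) (f : Int → Int) :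
    ∀ (rs : List Int), rs.Nodup →
      (rs.map (fun r => (d.insert (r0, a) (d.getD (r0, a) 0 + 1)).getD (r, f r) 0)).sum
        = (rs.map (fun r => d.getD (r, f r) 0)).sum
            + (if r0 ∈ rs ∧ f r0 = a then 1 else 0) := by
  intro rs
  induction rs with
  | nil => intro _; simp
  | cons r rs ih =>
    intro hnd
    have hnotmem : r ∉ rs := (List.nodup_cons.mp hnd).1
    have hih := ih (List.nodup_cons.mp hnd).2
    simp only [List.map_cons, List.sum_cons]
    rw [hih, PySem.Dict.getD_insert]
    by_cases h : ((r, f r) : Int × Int) = (r0, a)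
    · have hr : r = r0 := congrArg Prod.fst h
      have hf : f r0 = a := by rw [← hr]; exact congrArg Prod.snd h
      have hmem : r0 ∈ r :: rs := by rw [← hr]; exact List.mem_cons_self
      have hnot : ¬ (r0 ∈ rs ∧ f r0 = a) := fun hc => hnotmem (by rw [hr]; exact hc.1)
      rw [if_pos h, if_neg hnot, if_pos ⟨hmem, hf⟩, h]
      ring
    · have hiff : (r0 ∈ r :: rs ∧ f r0 = a) ↔ (r0 ∈ rs ∧ f r0 = a) := by
        constructor
        · rintro ⟨hm, hfa⟩
          rcases List.mem_cons.mp hm with he | hm'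
          · exact absurd (by rw [he] at hfa; rw [he, hfa] : ((r, f r) : Int × Int) = (r0, a)) h
          · exact ⟨hm', hfa⟩
        · exact fun ⟨hm, hfa⟩ => ⟨List.mem_cons_of_mem _ hm, hfa⟩
      rw [if_neg h, if_congr hiff rfl rfl]
      ring

theorem scoreB_empty (pat : List Int) : scoreB pat PySem.Dict.empty = 0 := by
  simp [scoreB, PySem.Dict.getD_empty]

theorem scoreB_fold (pat : List Int) (hdvd : pat.length ∣ 40) :
    ∀ (l : List Int) (s : Nat) (d : PySem.Dict (Int × Int) Int),
      scoreB pat ((PySem.List.enumerate l (s : Int)).foldl freqStep d)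
        = scoreB pat d + (cnt pat s l : Int) := by
  intro l
  induction l with
  | nil => intro s d; simp [cnt]
  | cons a t ih =>
    intro s d
    rw [PySem.List.enumerate_cons, List.foldl_cons]
    have hs1 : (s : Int) + 1 = ((s + 1 : Nat) : Int) := by push_cast; ring
    rw [hs1, ih]
    have hstep : freqStep d ((s : Int), a)
        = d.insert (((s % 40 : Nat) : Int), a) (d.getD (((s % 40 : Nat) : Int), a) 0 + 1) := by
      simp [freqStep]
    rw [hstep]
    unfold scoreB
    rw [sum_getD_insert d _ a _ _ (PySem.List.nodup_pyRange_one 0 40)]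
    have hmem : ((s % 40 : Nat) : Int) ∈ PySem.List.pyRange 0 40 1 := by
      rw [PySem.List.mem_pyRange_one]
      constructor
      · positivity
      · exact_mod_cast Nat.mod_lt s (by norm_num)
    have hfval : PySem.List.pyGetD pat (PySem.Int.mod ((s % 40 : Nat) : Int) (pat.length : Int)) 0
        = pat.getD (s % pat.length) 0 := by
      rw [pyGetD_mod, Nat.mod_mod_of_dvd s hdvd]
    simp only [cnt, hfval, hmem, true_and]
    split_ifs <;> push_cast <;> ring

theorem solution_spec : Claim_equal_solution := by
  intro answers _
  unfold Spec_solution solution solution_alt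
  have hA : (PySem.List.enumerate answers 0).foldl stepA [0, 0, 0, 0] =
      [0, (cnt [1,2,3,4,5] 0 answers : Int), (cnt [2,1,2,3,2,4,2,5] 0 answers : Int),
       (cnt [3,3,1,1,2,2,4,4,5,5] 0 answers : Int)] := by
    have h := foldA_eval answers 0 0 0 0
    simpa using h
  have hB : ∀ pat : List Int, pat.length ∣ 40 →
      scoreB pat (freqB answers) = (cnt pat 0 answers : Int) := by
    intro pat hdvd
    have h := scoreB_fold pat hdvd answers 0 PySem.Dict.empty
    simpa [freqB, scoreB_empty] using h
  have hB1 := hB [1,2,3,4,5] (by norm_num)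
  have hB2 := hB [2,1,2,3,2,4,2,5] (by norm_num)
  have hB3 := hB [3,3,1,1,2,2,4,4,5,5] (by norm_num)
  have hr : PySem.List.pyRange 1 4 1 = [1, 2, 3] := by decide
  have hr3 : PySem.List.pyRange 0 3 1 = [0, 1, 2] := by decide
  have hmax0 : max (0 : Int) ((cnt [1,2,3,4,5] 0 answers : Nat) : Int) =
      ((cnt [1,2,3,4,5] 0 answers : Nat) : Int) := max_eq_right (Int.natCast_nonneg _)
  simp only [hA, hB1, hB2, hB3, List.map_cons, List.map_nil, PySem.List.max?_id_cons,
    List.foldl_cons, List.foldl_nil, Option.getD_some, hmax0, List.length_cons,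
    List.length_nil, hr3, List.filter_cons, List.filter_nil, beq_iff_eq]
  set c1 := cnt [1,2,3,4,5] 0 answers with hc1
  set c2 := cnt [2,1,2,3,2,4,2,5] 0 answers with hc2
  set c3 := cnt [3,3,1,1,2,2,4,4,5,5] 0 answers with hc3
  norm_num [hr, List.foldl_cons, List.foldl_nil, List.filter_cons, List.filter_nil, beq_iff_eq,
    hget1, hget2, hget3, hget3a, hget3b, hget3c]
  split_ifs <;> first | (exfalso; omega) | simp
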